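-- pv_equiv track=rewrite | github.com/IschenkoVN/python-classes | 26.03.2014_L1Problem.py | decode_AON
-- ===== SOURCE A (Python) =====
-- def decode_AON(data):
--     char_list = list(data)
--     result_list = []
--     proxy_list = []
--     for index, elem in enumerate(char_list):
--         next_index = index + 1
--         pre_index = index - 1
--         if next_index < len(char_list):
--             if elem == char_list[next_index]:
--                 if elem == '#':
--                     if len(result_list) > 0:
--                         proxy_list.append(result_list[-1])
--                 else:
--                     proxy_list.append(elem)
--             else:
--                 if proxy_list:
--                     result_list.append(proxy_list[0])
--                     proxy_list = []
--     else:
--         if proxy_list: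
--             result_list.append(proxy_list[0])
--
--     return ''.join(result_list)
-- ===== SOURCE B (Python) =====
-- def decode_AON(data):
--     out = []
--     i, n = 0, len(data)
--     while i < n:
--         j = i + 1
--         while j < n and data[j] == data[i]:
--             j += 1
--         if j - i >= 2:
--             ch = data[i]
--             if ch == '#':
--                 if out:
--                     out.append(out[-1])
--             else:
--                 out.append(ch)
--         i = j
--     return ''.join(out)
-- ===== Notes on version B (the rewrite author's own statement) =====
-- stated objective: simpler
-- what changed: Replaced A's per-character enumerate scan with lookahead indexing and a proxy buffer list (appending one buffered copy per repeated character, then flushing its first element) by a single run-collapsing two-pointer scan that emits at most one character per maximal run directly into the output.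
import Mathlib
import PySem

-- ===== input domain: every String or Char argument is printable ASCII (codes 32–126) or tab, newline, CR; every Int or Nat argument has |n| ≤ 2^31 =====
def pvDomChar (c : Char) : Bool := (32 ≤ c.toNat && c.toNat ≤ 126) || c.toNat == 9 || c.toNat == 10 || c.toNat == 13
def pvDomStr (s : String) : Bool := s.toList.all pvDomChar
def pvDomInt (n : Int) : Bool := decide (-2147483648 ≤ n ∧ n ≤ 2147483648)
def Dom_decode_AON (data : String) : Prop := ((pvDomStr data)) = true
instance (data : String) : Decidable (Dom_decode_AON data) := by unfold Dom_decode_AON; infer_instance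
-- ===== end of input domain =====

-- B replaces A's index/lookahead scan with proxy buffering by a single run-collapsing
-- two-pointer scan emitting one char per run of length ≥ 2 (objective: simpler).

-- ===== PORT A =====
-- one loop iteration of A, as a named step (result_list, proxy_list are the fold state)
def stepA (char_list : List Char) (st : List Char × List Char) (p : Int × Char) :
    List Char × List Char :=
  let next_index := p.1 + 1
  if next_index < (char_list.length : Int) then
    if p.2 = (PySem.List.pyGet? char_list next_index).getD ' ' then
      -- the guard above makes the lookup in range, so getD ' ' is exact
      if p.2 = '#' then
        if st.1.length > 0 then
          (st.1, st.2 ++ [(PySem.List.pyGet? st.1 (-1)).getD ' '])  -- result_list[-1], nonempty by guard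
        else st
      else (st.1, st.2 ++ [p.2])
    else
      if st.2 ≠ [] then (st.1 ++ [st.2.headD ' '], ([] : List Char))  -- proxy_list[0], nonempty by guard
      else st
  else st

-- the for-else final flush of proxy_list
def finA (st : List Char × List Char) : List Char :=
  if st.2 ≠ [] then st.1 ++ [st.2.headD ' '] else st.1

def decode_AON (data : String) : String :=
  let char_list := data.toList
  let st := (PySem.List.enumerate char_list 0).foldl (stepA char_list) ([], [])
  String.ofList (finA st)

-- ===== PORT B =====
-- inner while loop of Source B: number of further chars equal to the run's char
def runLen (c : Char) : List Char → Nat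
  | [] => 0
  | d :: rest => if d = c then runLen c rest + 1 else 0

-- outer while loop of Source B: one iteration per maximal run
def bLoop : List Char → List Char → List Char
  | out, [] => out
  | out, c :: rest =>
    let k := runLen c rest
    let out' :=
      if k + 1 ≥ 2 then
        if c = '#' then (if out ≠ [] then out ++ [out.getLastD ' '] else out)
        else out ++ [c]
      else out
    bLoop out' (rest.drop k)
  termination_by _ l => l.length
  decreasing_by simp

def decode_AON_alt (data : String) : String := String.ofList (bLoop [] data.toList)

-- ===== PRECONDITION & SPEC =====
def Spec_decode_AON (data : String) (out : String) : Prop := out = decode_AON_alt data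
instance (data : String) (out : String) : Decidable (Spec_decode_AON data out) := by unfold Spec_decode_AON; infer_instance

-- ===== CLAIM (what is proved, stated in full; the proofs are below) =====
def Claim_equal_decode_AON : Prop := ∀ (data : String), Dom_decode_AON data → Spec_decode_AON data (decode_AON data)

-- ===== LEMMAS AND PROOFS =====

-- A's step, rewritten on the local pair (current char, next char)
def st2 (c d : Char) (st : List Char × List Char) : List Char × List Char :=
  if c = d then
    if c = '#' then
      if st.1.length > 0 then (st.1, st.2 ++ [(PySem.List.pyGet? st.1 (-1)).getD ' '])
      else st
    else (st.1, st.2 ++ [c])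
  else
    if st.2 ≠ [] then (st.1 ++ [st.2.headD ' '], ([] : List Char)) else st

-- A's loop as a local recursion on the suffix
def auxA : List Char → (List Char × List Char) → (List Char × List Char)
  | [], st => st
  | [_], st => st
  | c :: d :: rest, st => auxA (d :: rest) (st2 c d st)

-- what one equal-pair step appends to the proxy
def addL (c : Char) (res : List Char) : List Char :=
  if c = '#' then
    if res.length > 0 then [(PySem.List.pyGet? res (-1)).getD ' '] else []
  else [c]

lemma st2_eq_self (c : Char) (res px : List Char) :
    st2 c c (res, px) = (res, px ++ addL c res) := by
  simp only [st2, addL]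
  split_ifs <;> simp

lemma bridge (L : List Char) :
    ∀ (s : List Char) (i : Nat), L.drop i = s →
      ∀ st, (PySem.List.enumerate s (i : Int)).foldl (stepA L) st = auxA s st := by
  intro s
  induction s with
  | nil => intro i _ st; simp [PySem.List.enumerate_nil, auxA]
  | cons c s ih =>
    intro i hdrop st
    cases s with
    | nil =>
      have hlen : L.length = i + 1 := by
        have := congrArg List.length hdrop
        simp at this; omega
      simp only [PySem.List.enumerate_cons, PySem.List.enumerate_nil,
        List.foldl_cons, List.foldl_nil, auxA]
      simp [stepA, hlen]
    | cons d t =>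
      have hlen : i + 2 ≤ L.length := by
        have := congrArg List.length hdrop
        simp at this; omega
      have hget : PySem.List.pyGet? L ((i : Int) + 1) = some d := by
        have h1 : ((i : Int) + 1) = ((i + 1 : Nat) : Int) := by norm_cast
        rw [h1, PySem.List.pyGet?_natCast]
        have : L.drop (i + 1) = d :: t := by
          have : L.drop (i + 1) = (L.drop i).drop 1 := by
            rw [List.drop_drop]
          rw [this, hdrop]; simp
        rw [← List.head?_drop, this]; rfl
      have hstep : stepA L st (↑i, c) = st2 c d st := by
        simp only [stepA, st2, hget]
        have hguard : ((i : Int) + 1) < (L.length : Int) := by push_cast; omega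
        simp [hguard]
      have hdrop' : L.drop (i + 1) = d :: t := by
        have : L.drop (i + 1) = (L.drop i).drop 1 := by rw [List.drop_drop]
        rw [this, hdrop]; simp
      simp only [PySem.List.enumerate_cons, List.foldl_cons, hstep, auxA]
      have := ih (i + 1) hdrop' (st2 c d st)
      rw [← this]; norm_cast

lemma runA_mid (c d : Char) (t : List Char) (hne : c ≠ d) :
    ∀ (k : Nat) (res px : List Char),
      auxA (c :: (List.replicate k c ++ d :: t)) (res, px) =
        auxA (d :: t) (st2 c d (res, px ++ (List.replicate k (addL c res)).flatten)) := by
  intro k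
  induction k with
  | zero => intro res px; simp [auxA]
  | succ k ih =>
    intro res px
    have hshape : (List.replicate (k + 1) c ++ d :: t) = c :: (List.replicate k c ++ d :: t) := by
      simp [List.replicate_succ]
    rw [hshape]
    show auxA (c :: c :: (List.replicate k c ++ d :: t)) (res, px) = _
    rw [auxA, st2_eq_self, ih res (px ++ addL c res)]
    congr 2
    simp [List.replicate_succ]

lemma runA_end (c : Char) :
    ∀ (k : Nat) (res px : List Char),
      auxA (c :: List.replicate k c) (res, px) =
        (res, px ++ (List.replicate k (addL c res)).flatten) := by
  intro k
  induction k with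
  | zero => intro res px; simp [auxA]
  | succ k ih =>
    intro res px
    rw [List.replicate_succ, auxA, st2_eq_self, ih res (px ++ addL c res)]
    simp [List.replicate_succ]

-- flushing k buffered copies equals B's per-run emission
lemma finF (k : Nat) (c : Char) (res : List Char) :
    finA (res, (List.replicate k (addL c res)).flatten) =
      (if k + 1 ≥ 2 then
        if c = '#' then (if res ≠ [] then res ++ [res.getLastD ' '] else res)
        else res ++ [c]
      else res) := by
  cases k with
  | zero => simp [finA]
  | succ k =>
    have hge : k + 1 + 1 ≥ 2 := by omega
    rw [if_pos hge]
    by_cases hc : c = '#'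
    · by_cases hr : res = []
      · subst hr; simp [addL, hc, finA]
      · have hlen : res.length > 0 := List.length_pos_iff.mpr hr
        simp [addL, hc, hr, hlen, List.replicate_succ, finA, PySem.List.pyGet?_neg_one,
          List.getLastD_eq_getLast?]
    · simp [addL, hc, List.replicate_succ, finA]

lemma st2_flush (c d : Char) (hne : c ≠ d) (res px : List Char) :
    st2 c d (res, px) = (finA (res, px), []) := by
  simp only [st2, finA, if_neg hne]
  split_ifs with h
  · simp
  · simp at h; simp [h]

lemma runLen_take (c : Char) : ∀ (l : List Char), l.take (runLen c l) = List.replicate (runLen c l) c := by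
  intro l
  induction l with
  | nil => simp [runLen]
  | cons d t ih =>
    by_cases h : d = c
    · simp [runLen, h, List.replicate_succ, ih]
    · simp [runLen, h]

lemma runLen_head (c : Char) : ∀ (l : List Char) (d : Char) (t : List Char),
    l.drop (runLen c l) = d :: t → c ≠ d := by
  intro l
  induction l with
  | nil => intro d t h; simp [runLen] at h
  | cons x xs ih =>
    intro d t h
    by_cases hx : x = c
    · simp [runLen, hx] at h
      exact ih d t h
    · simp [runLen, hx] at h
      intro hc; exact hx (h.1.trans hc.symm)

lemma main_loop : ∀ (n : Nat) (l : List Char), l.length ≤ n →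
    ∀ res, finA (auxA l (res, [])) = bLoop res l := by
  intro n
  induction n with
  | zero =>
    intro l hl res
    have : l = [] := List.eq_nil_of_length_eq_zero (Nat.le_zero.mp hl)
    subst this; simp [auxA, finA, bLoop]
  | succ n ih =>
    intro l hl res
    cases l with
    | nil => simp [auxA, finA, bLoop]
    | cons c rest =>
      obtain ⟨k, hk⟩ : ∃ k, runLen c rest = k := ⟨_, rfl⟩
      have hsplit : rest = List.replicate k c ++ rest.drop k := by
        conv_lhs => rw [← List.take_append_drop k rest]
        rw [← hk, runLen_take c rest, hk]
      have hrw : bLoop res (c :: rest) =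
          bLoop (if k + 1 ≥ 2 then
                   if c = '#' then (if res ≠ [] then res ++ [res.getLastD ' '] else res)
                   else res ++ [c]
                 else res) (rest.drop k) := by
        rw [bLoop, hk]
      cases hdt : rest.drop k with
      | nil =>
        have hlist : c :: rest = c :: List.replicate k c := by
          rw [hsplit, hdt, List.append_nil]
        have h1 : finA (auxA (c :: List.replicate k c) (res, [])) =
            finA (res, (List.replicate k (addL c res)).flatten) := by
          rw [runA_end]; simp only [List.nil_append]
        rw [hrw, hdt, hlist, h1, finF]
        simp [bLoop]
      | cons d t =>
        have hcd : c ≠ d := runLen_head c rest d t (by rw [hk, hdt])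
        have hlist : c :: rest = c :: (List.replicate k c ++ d :: t) := by
          rw [hsplit, hdt]
        have h1 : finA (auxA (c :: (List.replicate k c ++ d :: t)) (res, [])) =
            finA (auxA (d :: t)
              (finA (res, (List.replicate k (addL c res)).flatten), [])) := by
          rw [runA_mid c d t hcd, st2_flush c d hcd]
          simp only [List.nil_append]
        have hlen2 : (d :: t).length ≤ n := by
          have h2 := congrArg List.length hsplit
          rw [hdt] at h2
          simp at h2 hl
          simp; omega
        rw [hrw, hdt, hlist, h1, finF]
        exact ih (d :: t) hlen2 _

-- ===== VERDICT (by name: the statement is the Claim_ definition above) =====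
theorem decode_AON_spec : Claim_equal_decode_AON := by
  intro data _
  unfold Spec_decode_AON decode_AON decode_AON_alt
  simp only
  have hb := bridge data.toList data.toList 0 (by simp) (([] : List Char), ([] : List Char))
  norm_num at hb
  rw [hb, main_loop data.toList.length data.toList le_rfl []]
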